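-- pv_equiv track=rewrite | github.com/bigluck07/All_night_study | 알고리즘/codestate_algoStudy/모고3_1번__lv.py | solution
-- ===== SOURCE A (Python) =====
-- def solution(cards):
--     answer = 0
--     hands = {}
--     for i in cards:
--         if i in hands:
--             hands[int(i)]+=1
--         else:
--             hands[int(i)] = 1
--
--         if 0 in hands: #조커 있으면
--             if hands[0] == 5:
--                 answer+=1
--                 hands = {}
--             cnt = sorted(hands.items(), key=lambda x: x[1], reverse=True)
--             cnt = [x for x in cnt if x[0]!=0]
--             if len(cnt) > 1:
--                 if (cnt[0][1] + cnt[1][1] + hands[0]) > 4: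
--                     answer+=1
--                     hands = {}
--             elif len(cnt) == 1:
--                 if (cnt[0][1]+hands[0]) > 4 and (hands[0] > 1):
--                     answer+=1
--                     hands = {}
--         else:
--             cnt = sorted(hands.items(), key=lambda x: x[1], reverse=True)
--             cnt = [x for x in cnt if x[0]!=0]
--             if len(cnt) > 1:
--                 if (cnt[0][1] + cnt[1][1]) > 4 and (cnt[0][1]>1) and (cnt[1][1]>1):
--                     answer+=1
--                     hands = {}
--     return answer
-- ===== SOURCE B (Python) =====
-- def solution(cards):
--     # One pass: maintain joker count and the top-two non-joker value counts
--     # incrementally instead of re-sorting the hand after every card.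
--     answer = 0
--     counts = {}   # non-joker value -> count
--     jokers = 0    # count of 0-cards in the current hand
--     n = 0         # number of distinct non-joker values in the hand
--     m1 = m2 = 0   # largest and second-largest non-joker counts
--     for i in cards:
--         if i == 0:
--             jokers += 1
--         else:
--             c = counts.get(i, 0)
--             counts[i] = c + 1
--             if c == 0:
--                 n += 1
--             if c == m1:
--                 m1, m2 = c + 1, m2
--             else:
--                 m2 = max(m2, c + 1)
--         if jokers > 0:
--             if jokers == 5:
--                 answer += 1
--             elif n > 1 and m1 + m2 + jokers > 4:
--                 answer += 1
--             elif n == 1 and m1 + jokers > 4 and jokers > 1: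
--                 answer += 1
--             else:
--                 continue
--         else:
--             if n > 1 and m1 + m2 > 4 and m1 > 1 and m2 > 1:
--                 answer += 1
--             else:
--                 continue
--         counts, jokers, n, m1, m2 = {}, 0, 0, 0, 0
--     return answer
-- ===== Notes on version B (the rewrite author's own statement) =====
-- stated objective: faster
-- what changed: Instead of re-sorting the whole hand dict after every card, B maintains the joker count, the number of distinct non-joker values and the top-two non-joker counts incrementally in one pass, so each card is O(1).
import Mathlib
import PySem

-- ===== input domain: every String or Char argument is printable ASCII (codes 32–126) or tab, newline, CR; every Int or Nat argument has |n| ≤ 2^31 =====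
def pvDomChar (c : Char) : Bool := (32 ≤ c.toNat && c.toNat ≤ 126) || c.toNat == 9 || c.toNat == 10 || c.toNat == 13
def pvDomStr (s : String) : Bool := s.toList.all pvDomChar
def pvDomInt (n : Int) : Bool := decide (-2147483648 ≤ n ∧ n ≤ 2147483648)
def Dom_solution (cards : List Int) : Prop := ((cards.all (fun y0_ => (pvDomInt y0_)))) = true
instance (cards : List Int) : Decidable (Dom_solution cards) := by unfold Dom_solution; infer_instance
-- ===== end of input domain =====

-- B maintains the joker count and the top-two non-joker counts incrementally instead of
-- re-sorting the hand after every card (objective: faster).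

-- ===== PORT A =====
-- one iteration of A's loop; state = (answer, hands)
def solutionStep (s : Int × PySem.Dict Int Int) (i : Int) : Int × PySem.Dict Int Int :=
  let hands := if s.2.contains i then s.2.insert i (s.2.getD i 0 + 1) else s.2.insert i 1
  if hands.contains 0 then
    -- joker present
    let p := if hands.getD 0 0 = 5 then (s.1 + 1, (PySem.Dict.empty : PySem.Dict Int Int))
             else (s.1, hands)
    let answer := p.1
    let hands := p.2
    let cnt := (PySem.List.sorted hands.items (fun x => x.2) true).filter (fun x => decide (x.1 ≠ 0))
    match cnt with
    | c0 :: c1 :: _ =>   -- len(cnt) > 1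
        if c0.2 + c1.2 + hands.getD 0 0 > 4 then (answer + 1, PySem.Dict.empty)
        else (answer, hands)
    | [c0] =>            -- len(cnt) == 1
        if c0.2 + hands.getD 0 0 > 4 ∧ hands.getD 0 0 > 1 then (answer + 1, PySem.Dict.empty)
        else (answer, hands)
    | [] => (answer, hands)
  else
    let cnt := (PySem.List.sorted hands.items (fun x => x.2) true).filter (fun x => decide (x.1 ≠ 0))
    match cnt with
    | c0 :: c1 :: _ =>   -- len(cnt) > 1
        if c0.2 + c1.2 > 4 ∧ c0.2 > 1 ∧ c1.2 > 1 then (s.1 + 1, PySem.Dict.empty)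
        else (s.1, hands)
    | _ => (s.1, hands)

def solution (cards : List Int) : Int :=
  (cards.foldl solutionStep (0, PySem.Dict.empty)).1

-- ===== PORT B =====
-- one iteration of B's loop; state = (answer, counts, jokers, n, m1, m2)
def solutionAltStep (s : Int × PySem.Dict Int Int × Int × Int × Int × Int) (i : Int) :
    Int × PySem.Dict Int Int × Int × Int × Int × Int :=
  let t := if i = 0 then (s.2.1, s.2.2.1 + 1, s.2.2.2.1, s.2.2.2.2.1, s.2.2.2.2.2)
    else
      let c := s.2.1.getD i 0
      let counts := s.2.1.insert i (c + 1)
      let n := if c = 0 then s.2.2.2.1 + 1 else s.2.2.2.1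
      let mm := if c = s.2.2.2.2.1 then (c + 1, s.2.2.2.2.2)
                else (s.2.2.2.2.1, max s.2.2.2.2.2 (c + 1))
      (counts, s.2.2.1, n, mm.1, mm.2)
  let win :=
    if t.2.1 > 0 then
      if t.2.1 = 5 then true
      else if t.2.2.1 > 1 ∧ t.2.2.2.1 + t.2.2.2.2 + t.2.1 > 4 then true
      else if t.2.2.1 = 1 ∧ t.2.2.2.1 + t.2.1 > 4 ∧ t.2.1 > 1 then true
      else false
    else
      if t.2.2.1 > 1 ∧ t.2.2.2.1 + t.2.2.2.2 > 4 ∧ t.2.2.2.1 > 1 ∧ t.2.2.2.2 > 1 then true else false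
  if win then (s.1 + 1, PySem.Dict.empty, 0, 0, 0, 0)
  else (s.1, t.1, t.2.1, t.2.2.1, t.2.2.2.1, t.2.2.2.2)

def solution_alt (cards : List Int) : Int :=
  (cards.foldl solutionAltStep (0, PySem.Dict.empty, 0, 0, 0, 0)).1

-- ===== PRECONDITION & SPEC =====
def Spec_solution (cards : List Int) (out : Int) : Prop := out = solution_alt cards
instance (cards : List Int) (out : Int) : Decidable (Spec_solution cards out) := by unfold Spec_solution; infer_instance

-- ===== CLAIM (what is proved, stated in full; the proofs are below) =====
def Claim_equal_solution : Prop := ∀ (cards : List Int), Dom_solution cards → Spec_solution cards (solution cards)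

-- ===== LEMMAS AND PROOFS =====

-- "top two counts" of a multiset, as a fold; ties B's (m1, m2) to A's sorting
def top2ins (c : Int) (p : Int × Int) : Int × Int :=
  if p.1 ≤ c then (c, p.1) else if p.2 < c then (p.1, c) else p

def top2 (l : List Int) : Int × Int := l.foldr top2ins (0, 0)

theorem top2_cons (x : Int) (l : List Int) : top2 (x :: l) = top2ins x (top2 l) := rfl

-- coupling invariant between A's state and B's state
def StInv (sA : Int × PySem.Dict Int Int) (sB : Int × PySem.Dict Int Int × Int × Int × Int × Int) : Prop :=
  sA.1 = sB.1 ∧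
  sB.2.1.items = sA.2.items.filter (fun p => decide (p.1 ≠ 0)) ∧
  sB.2.2.1 = sA.2.getD 0 0 ∧
  sA.2.keys.Nodup ∧
  (∀ v ∈ sA.2.values, 1 ≤ v) ∧
  sB.2.2.2.1 = (sB.2.1.size : Int) ∧
  (sB.2.2.2.2.1, sB.2.2.2.2.2) = top2 sB.2.1.values

-- the "check for a winning hand" tail of A's loop body (everything after the dict update)
def checkA (a : Int) (hands : PySem.Dict Int Int) : Int × PySem.Dict Int Int :=
  if hands.contains 0 then
    let p := if hands.getD 0 0 = 5 then (a + 1, (PySem.Dict.empty : PySem.Dict Int Int))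
             else (a, hands)
    let answer := p.1
    let hands := p.2
    let cnt := (PySem.List.sorted hands.items (fun x => x.2) true).filter (fun x => decide (x.1 ≠ 0))
    match cnt with
    | c0 :: c1 :: _ =>
        if c0.2 + c1.2 + hands.getD 0 0 > 4 then (answer + 1, PySem.Dict.empty)
        else (answer, hands)
    | [c0] =>
        if c0.2 + hands.getD 0 0 > 4 ∧ hands.getD 0 0 > 1 then (answer + 1, PySem.Dict.empty)
        else (answer, hands)
    | [] => (answer, hands)
  else
    let cnt := (PySem.List.sorted hands.items (fun x => x.2) true).filter (fun x => decide (x.1 ≠ 0))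
    match cnt with
    | c0 :: c1 :: _ =>
        if c0.2 + c1.2 > 4 ∧ c0.2 > 1 ∧ c1.2 > 1 then (a + 1, PySem.Dict.empty)
        else (a, hands)
    | _ => (a, hands)

-- the "decide and reset" tail of B's loop body
def checkB (a : Int) (d : PySem.Dict Int Int) (j n m1 m2 : Int) :
    Int × PySem.Dict Int Int × Int × Int × Int × Int :=
  let win :=
    if j > 0 then
      if j = 5 then true
      else if n > 1 ∧ m1 + m2 + j > 4 then true
      else if n = 1 ∧ m1 + j > 4 ∧ j > 1 then true
      else false
    else
      if n > 1 ∧ m1 + m2 > 4 ∧ m1 > 1 ∧ m2 > 1 then true else false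
  if win then (a + 1, PySem.Dict.empty, 0, 0, 0, 0)
  else (a, d, j, n, m1, m2)

theorem stepA_eq (a : Int) (h : PySem.Dict Int Int) (i : Int) :
    solutionStep (a, h) i =
      checkA a (if h.contains i then h.insert i (h.getD i 0 + 1) else h.insert i 1) := rfl

theorem stepB_eq (a : Int) (d : PySem.Dict Int Int) (j n m1 m2 i : Int) :
    solutionAltStep (a, d, j, n, m1, m2) i =
      (let t := if i = 0 then (d, j + 1, n, m1, m2)
        else
          let c := d.getD i 0
          let counts := d.insert i (c + 1)
          let n' := if c = 0 then n + 1 else n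
          let mm := if c = m1 then (c + 1, m2) else (m1, max m2 (c + 1))
          (counts, j, n', mm.1, mm.2)
       checkB a t.1 t.2.1 t.2.2.1 t.2.2.2.1 t.2.2.2.2) := rfl

theorem top2ins_comm (a b : Int) (p : Int × Int) :
    top2ins a (top2ins b p) = top2ins b (top2ins a p) := by
  rcases p with ⟨x, y⟩
  simp only [top2ins]
  split_ifs <;> simp_all [Prod.ext_iff] <;> omega

theorem top2_perm {l l' : List Int} (h : l.Perm l') : top2 l = top2 l' := by
  induction h with
  | nil => rfl
  | cons x _ ih => rw [top2_cons, top2_cons, ih]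
  | swap x y t => rw [top2_cons, top2_cons, top2_cons, top2_cons]; exact top2ins_comm y x (top2 t)
  | trans _ _ ih1 ih2 => rw [ih1, ih2]

theorem top2_facts (l : List Int) (h0 : ∀ x ∈ l, 0 ≤ x) :
    0 ≤ (top2 l).2 ∧ (top2 l).2 ≤ (top2 l).1 ∧ ∀ x ∈ l, x ≤ (top2 l).1 := by
  induction l with
  | nil => exact ⟨le_refl 0, le_refl 0, by simp⟩
  | cons x t ih =>
    have hx : 0 ≤ x := h0 x (List.mem_cons_self ..)
    obtain ⟨i1, i2, i3⟩ := ih (fun y hy => h0 y (List.mem_cons_of_mem x hy))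
    rw [top2_cons]
    rcases hT : top2 t with ⟨A, B⟩
    rw [hT] at i1 i2 i3
    simp only [top2ins]
    split_ifs with h1 h2 <;> dsimp only
    · refine ⟨by omega, h1, ?_⟩
      intro y hy
      rcases List.mem_cons.mp hy with rfl | hy
      · omega
      · exact le_trans (i3 y hy) (by omega)
    · refine ⟨hx, by omega, ?_⟩
      intro y hy
      rcases List.mem_cons.mp hy with rfl | hy
      · omega
      · exact i3 y hy
    · refine ⟨i1, i2, ?_⟩
      intro y hy
      rcases List.mem_cons.mp hy with rfl | hy
      · omega
      · exact i3 y hy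

theorem top2_le_of_bound (l : List Int) (B : Int) (hB : 0 ≤ B) (h : ∀ x ∈ l, x ≤ B) :
    (top2 l).1 ≤ B := by
  induction l with
  | nil => simpa [top2]
  | cons x t ih =>
    have hx : x ≤ B := h x (List.mem_cons_self ..)
    have hih : (top2 t).1 ≤ B := ih (fun y hy => h y (List.mem_cons_of_mem x hy))
    rw [top2_cons]
    rcases hT : top2 t with ⟨A, C⟩
    rw [hT] at hih
    simp only [top2ins]
    split_ifs <;> dsimp only <;> omega


theorem top2_update (c A B : Int) (hBA : B ≤ A) :
    top2ins (c + 1) (A, B) =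
      (if c = (top2ins c (A, B)).1 then (c + 1, (top2ins c (A, B)).2)
       else ((top2ins c (A, B)).1, max (top2ins c (A, B)).2 (c + 1))) := by
  rcases hE : top2ins c (A, B) with ⟨X, Y⟩
  simp only [top2ins] at hE ⊢
  split_ifs at hE ⊢ <;>
    (rw [Prod.mk.injEq] at hE; obtain ⟨e1, e2⟩ := hE; rw [Prod.mk.injEq]; constructor <;> omega)

theorem top2_newkey (m1 m2 : Int) (h2 : 0 ≤ m2) (h12 : m2 ≤ m1) :
    top2ins 1 (m1, m2) = if (0 : Int) = m1 then (1, m2) else (m1, max m2 1) := by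
  simp only [top2ins]
  split_ifs <;> (rw [Prod.mk.injEq]; constructor <;> omega)

theorem top2_single (c : Int) (hc : 0 ≤ c) : top2 [c] = (c, 0) := by
  simp only [top2, List.foldr_cons, List.foldr_nil, top2ins]
  rw [if_pos (by simpa using hc)]

theorem top2_desc (c0 c1 : Int × Int) (rest : List (Int × Int))
    (hp : (c0 :: c1 :: rest).Pairwise (fun x y : Int × Int => y.2 ≤ x.2))
    (hnn : ∀ p ∈ c0 :: c1 :: rest, 1 ≤ p.2) :
    top2 ((c0 :: c1 :: rest).map (fun p => p.2)) = (c0.2, c1.2) := by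
  have h01 : c1.2 ≤ c0.2 := (List.pairwise_cons.mp hp).1 c1 (List.mem_cons_self ..)
  have hr : ∀ x ∈ rest.map (fun p : Int × Int => p.2), x ≤ c1.2 := by
    intro x hx
    obtain ⟨q, hq, rfl⟩ := List.mem_map.mp hx
    exact (List.pairwise_cons.mp (List.pairwise_cons.mp hp).2).1 q hq
  have h1p : (0 : Int) ≤ c1.2 := le_trans (by norm_num) (hnn c1 (by simp))
  have hb := top2_le_of_bound (rest.map (fun p => p.2)) c1.2 h1p hr
  have hf := top2_facts (rest.map (fun p : Int × Int => p.2)) (fun x hx => by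
    obtain ⟨q, hq, rfl⟩ := List.mem_map.mp hx
    exact le_trans (by norm_num) (hnn q (by simp [hq])))
  rcases hT : top2 (rest.map (fun p : Int × Int => p.2)) with ⟨A, B⟩
  rw [hT] at hb hf
  simp only [List.map_cons, top2_cons, hT, top2ins]
  split_ifs <;> simp_all [Prod.ext_iff]

theorem filter_upd0 (l : List (Int × Int)) (v : Int) :
    ((l.map (fun p => if p.1 == (0 : Int) then ((0 : Int), v) else p)).filter
        (fun p => decide (p.1 ≠ 0))) = l.filter (fun p => decide (p.1 ≠ 0)) := by
  induction l with
  | nil => rfl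
  | cons q t ih =>
    by_cases hq : q.1 = 0 <;> simpa [hq] using ih

theorem filter_updi (l : List (Int × Int)) (i v : Int) (hi : i ≠ 0) :
    ((l.map (fun p => if p.1 == i then (i, v) else p)).filter (fun p => decide (p.1 ≠ 0))) =
      (l.filter (fun p => decide (p.1 ≠ 0))).map (fun p => if p.1 == i then (i, v) else p) := by
  induction l with
  | nil => rfl
  | cons q t ih =>
    have hi' : (0 : Int) ≠ i := Ne.symm hi
    by_cases hq : q.1 = i
    · simpa [hq, hi, hi'] using ih
    · by_cases hq0 : q.1 = 0
      · simpa [hq, hq0, hi'] using ih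
      · simpa [hq, hq0] using ih

theorem map_upd_of_not_mem (l : List (Int × Int)) (i v : Int)
    (h : i ∉ l.map (fun p => p.1)) :
    l.map (fun p => if p.1 == i then (i, v) else p) = l := by
  induction l with
  | nil => rfl
  | cons q t ih =>
    simp only [List.map_cons, List.mem_cons] at h ⊢
    have h1 : i ≠ q.1 := fun hh => h (Or.inl hh)
    have h2 : i ∉ t.map (fun p : Int × Int => p.1) := fun hh => h (Or.inr hh)
    rw [if_neg (by simpa using Ne.symm h1), ih h2]

theorem dict_sub_nodup (h d : PySem.Dict Int Int)
    (hI : d.items = h.items.filter (fun p => decide (p.1 ≠ 0)))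
    (hND : h.keys.Nodup) : d.keys.Nodup := by
  have hs : d.items.Sublist h.items := by rw [hI]; exact List.filter_sublist
  have hm := hs.map (fun p : Int × Int => p.1)
  simp only [PySem.Dict.keys] at hND ⊢
  exact hm.nodup hND

theorem dict_get?_transfer (h d : PySem.Dict Int Int)
    (hI : d.items = h.items.filter (fun p => decide (p.1 ≠ 0)))
    (hND : h.keys.Nodup) (k : Int) (hk : k ≠ 0) :
    d.get? k = h.get? k := by
  have hdnd := dict_sub_nodup h d hI hND
  cases hg : h.get? k with
  | none =>
    have hnm : k ∉ h.keys := (PySem.Dict.get?_eq_none_iff_not_mem_keys h k).mp hg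
    rw [PySem.Dict.get?_eq_none_iff_not_mem_keys]
    intro hm
    apply hnm
    have hs : d.items.Sublist h.items := by rw [hI]; exact List.filter_sublist
    have hsub := (hs.map (fun p : Int × Int => p.1)).subset
    simp only [PySem.Dict.keys] at hm ⊢
    exact hsub hm
  | some v =>
    have hm : (k, v) ∈ h.items := PySem.Dict.mem_items_of_get?_eq_some _ hg
    have hm' : (k, v) ∈ d.items := by
      rw [hI]; exact List.mem_filter.mpr ⟨hm, by simp [hk]⟩
    exact PySem.Dict.get?_of_mem_items _ hm' hdnd

theorem dict_values_sub (h d : PySem.Dict Int Int)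
    (hI : d.items = h.items.filter (fun p => decide (p.1 ≠ 0))) :
    ∀ v ∈ d.values, v ∈ h.values := by
  intro v hv
  have hs : d.items.Sublist h.items := by rw [hI]; exact List.filter_sublist
  simp only [PySem.Dict.values] at hv ⊢
  exact (hs.map (fun p : Int × Int => p.2)).subset hv

theorem getD_pos_of_contains (h : PySem.Dict Int Int) (hPos : ∀ v ∈ h.values, 1 ≤ v)
    (k : Int) (hc : h.contains k = true) : 1 ≤ h.getD k 0 := by
  rw [PySem.Dict.contains_eq_isSome_get?] at hc
  obtain ⟨v, hv⟩ := Option.isSome_iff_exists.mp hc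
  rw [PySem.Dict.getD_eq_get?_getD, hv]
  have hm := PySem.Dict.mem_items_of_get?_eq_some _ hv
  exact hPos v (by simp only [PySem.Dict.values]; exact List.mem_map.mpr ⟨(k, v), hm, rfl⟩)

theorem StInv_reset (x : Int) : StInv (x, PySem.Dict.empty) (x, PySem.Dict.empty, 0, 0, 0, 0) := by
  refine ⟨rfl, rfl, (PySem.Dict.getD_empty 0 0).symm, ?_, ?_, ?_, rfl⟩
  · simp [PySem.Dict.keys_empty]
  · intro v hv
    simp only [PySem.Dict.values, PySem.Dict.empty] at hv
    simp at hv
  · simp [PySem.Dict.size, PySem.Dict.empty]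

theorem cnt_facts (hands d : PySem.Dict Int Int) (n m1 m2 : Int)
    (hI : d.items = hands.items.filter (fun p => decide (p.1 ≠ 0)))
    (hdpos : ∀ v ∈ d.values, 1 ≤ v)
    (hN : n = (d.size : Int))
    (hM : (m1, m2) = top2 d.values)
    (cnt : List (Int × Int))
    (hcnt : (PySem.List.sorted hands.items (fun x => x.2) true).filter (fun x => decide (x.1 ≠ 0)) = cnt) :
    (cnt.length : Int) = n ∧ (∀ p ∈ cnt, 1 ≤ p.2) ∧ (m1, m2) = top2 (cnt.map (fun p => p.2)) ∧
      cnt.Pairwise (fun x y : Int × Int => y.2 ≤ x.2) := by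
  have hperm : cnt.Perm d.items := by
    rw [← hcnt, hI]
    exact List.Perm.filter _ (PySem.List.sorted_perm hands.items (fun x => x.2) true)
  have hvals : d.values = d.items.map (fun p => p.2) := rfl
  refine ⟨?_, ?_, ?_, ?_⟩
  · rw [hN]
    simp only [PySem.Dict.size]
    exact_mod_cast hperm.length_eq
  · intro p hp
    have hpd : p ∈ d.items := hperm.subset hp
    exact hdpos p.2 (by rw [hvals]; exact List.mem_map.mpr ⟨p, hpd, rfl⟩)
  · rw [hM, hvals]
    exact (top2_perm (hperm.map (fun p => p.2))).symm
  · rw [← hcnt]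
    exact List.Pairwise.sublist List.filter_sublist (PySem.List.sorted_pairwise_rev hands.items (fun x => x.2))

theorem check_inv (a : Int) (hands d : PySem.Dict Int Int) (j n m1 m2 : Int)
    (hI : d.items = hands.items.filter (fun p => decide (p.1 ≠ 0)))
    (hJ : j = hands.getD 0 0)
    (hND : hands.keys.Nodup)
    (hPos : ∀ v ∈ hands.values, 1 ≤ v)
    (hN : n = (d.size : Int))
    (hM : (m1, m2) = top2 d.values) :
    StInv (checkA a hands) (checkB a d j n m1 m2) := by
  have hdpos : ∀ v ∈ d.values, 1 ≤ v := fun v hv => hPos v (dict_values_sub hands d hI v hv)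
  unfold checkA checkB
  by_cases hcz : hands.contains 0 = true
  · rw [if_pos hcz]
    have hj1 : 1 ≤ j := hJ ▸ getD_pos_of_contains hands hPos 0 hcz
    have hjpos : j > 0 := hj1
    by_cases h5 : hands.getD 0 0 = 5
    · -- five jokers: both sides reset
      rw [if_pos h5]
      have hj5 : j = 5 := by rw [hJ, h5]
      dsimp only
      have hnil : (PySem.List.sorted (PySem.Dict.empty : PySem.Dict Int Int).items
          (fun x => x.2) true).filter (fun x => decide (x.1 ≠ 0)) = ([] : List (Int × Int)) := rfl
      rw [hnil, if_pos hjpos, if_pos hj5, if_pos rfl]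
      exact StInv_reset (a + 1)
    · rw [if_neg h5]
      have hj5 : ¬ j = 5 := by rw [hJ]; exact h5
      dsimp only
      generalize hcnt : (PySem.List.sorted hands.items (fun x => x.2) true).filter
        (fun x => decide (x.1 ≠ 0)) = cnt
      obtain ⟨hlen, hcv, htop, hpw⟩ := cnt_facts hands d n m1 m2 hI hdpos hN hM cnt hcnt
      rcases cnt with _ | ⟨c0, _ | ⟨c1, rest⟩⟩
      · -- empty: no win on either side
        dsimp only
        have hn0 : n = 0 := by simpa using hlen.symm
        rw [if_pos hjpos, if_neg hj5, if_neg (fun hx : n > 1 ∧ m1 + m2 + j > 4 => by omega),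
          if_neg (fun hx : n = 1 ∧ m1 + j > 4 ∧ j > 1 => by omega),
          if_neg Bool.false_ne_true]
        exact ⟨rfl, hI, hJ, hND, hPos, hN, hM⟩
      · -- exactly one distinct non-joker value
        dsimp only
        have hn1 : n = 1 := by simpa using hlen.symm
        have h1c : 1 ≤ c0.2 := hcv c0 (by simp)
        have hm12 : m1 = c0.2 ∧ m2 = 0 := by
          rw [List.map_cons, List.map_nil, top2_single c0.2 (by omega)] at htop
          simpa [Prod.ext_iff] using htop
        by_cases hw : c0.2 + hands.getD 0 0 > 4 ∧ hands.getD 0 0 > 1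
        · rw [if_pos hw]
          have hbw : n = 1 ∧ m1 + j > 4 ∧ j > 1 :=
            ⟨hn1, by rw [hm12.1, hJ]; exact hw.1, by rw [hJ]; exact hw.2⟩
          rw [if_pos hjpos, if_neg hj5,
            if_neg (fun hx : n > 1 ∧ m1 + m2 + j > 4 => by omega), if_pos hbw, if_pos rfl]
          exact StInv_reset (a + 1)
        · rw [if_neg hw]
          have hbw : ¬ (n = 1 ∧ m1 + j > 4 ∧ j > 1) := by
            intro hx
            apply hw
            constructor
            · rw [← hJ]; have := hm12.1; omega
            · rw [← hJ]; exact hx.2.2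
          rw [if_pos hjpos, if_neg hj5,
            if_neg (fun hx : n > 1 ∧ m1 + m2 + j > 4 => by omega), if_neg hbw,
            if_neg Bool.false_ne_true]
          exact ⟨rfl, hI, hJ, hND, hPos, hN, hM⟩
      · -- at least two distinct non-joker values
        dsimp only
        have hn2 : 2 ≤ n := by
          rw [← hlen]
          simp only [List.length_cons]
          push_cast
          omega
        have hmd := top2_desc c0 c1 rest hpw hcv
        rw [hmd] at htop
        simp only [Prod.mk.injEq] at htop
        obtain ⟨hm1, hm2⟩ := htop
        by_cases hw : c0.2 + c1.2 + hands.getD 0 0 > 4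
        · rw [if_pos hw]
          have hbw : n > 1 ∧ m1 + m2 + j > 4 := ⟨by omega, by rw [hm1, hm2, hJ]; exact hw⟩
          rw [if_pos hjpos, if_neg hj5, if_pos hbw, if_pos rfl]
          exact StInv_reset (a + 1)
        · rw [if_neg hw]
          have hbw : ¬ (n > 1 ∧ m1 + m2 + j > 4) := by
            intro hx
            apply hw
            rw [← hm1, ← hm2, ← hJ]
            exact hx.2
          rw [if_pos hjpos, if_neg hj5, if_neg hbw,
            if_neg (fun hx : n = 1 ∧ m1 + j > 4 ∧ j > 1 => by omega),
            if_neg Bool.false_ne_true]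
          exact ⟨rfl, hI, hJ, hND, hPos, hN, hM⟩
  · -- no joker in the hand
    rw [if_neg hcz]
    have hcf : hands.contains 0 = false := by
      cases hcb : hands.contains 0
      · rfl
      · exact absurd hcb hcz
    have hj0 : j = 0 := by rw [hJ]; exact PySem.Dict.getD_of_not_contains _ _ hcf
    have hjn : ¬ j > 0 := by omega
    dsimp only
    generalize hcnt : (PySem.List.sorted hands.items (fun x => x.2) true).filter
      (fun x => decide (x.1 ≠ 0)) = cnt
    obtain ⟨hlen, hcv, htop, hpw⟩ := cnt_facts hands d n m1 m2 hI hdpos hN hM cnt hcnt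
    rcases cnt with _ | ⟨c0, _ | ⟨c1, rest⟩⟩
    · dsimp only
      have hn0 : n = 0 := by simpa using hlen.symm
      rw [if_neg hjn, if_neg (fun hx : n > 1 ∧ m1 + m2 > 4 ∧ m1 > 1 ∧ m2 > 1 => by omega),
        if_neg Bool.false_ne_true]
      exact ⟨rfl, hI, hJ, hND, hPos, hN, hM⟩
    · dsimp only
      have hn1 : n = 1 := by simpa using hlen.symm
      rw [if_neg hjn, if_neg (fun hx : n > 1 ∧ m1 + m2 > 4 ∧ m1 > 1 ∧ m2 > 1 => by omega),
        if_neg Bool.false_ne_true]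
      exact ⟨rfl, hI, hJ, hND, hPos, hN, hM⟩
    · dsimp only
      have hn2 : 2 ≤ n := by
        rw [← hlen]
        simp only [List.length_cons]
        push_cast
        omega
      have hmd := top2_desc c0 c1 rest hpw hcv
      rw [hmd] at htop
      simp only [Prod.mk.injEq] at htop
      obtain ⟨hm1, hm2⟩ := htop
      by_cases hw : c0.2 + c1.2 > 4 ∧ c0.2 > 1 ∧ c1.2 > 1
      · rw [if_pos hw]
        have hbw : n > 1 ∧ m1 + m2 > 4 ∧ m1 > 1 ∧ m2 > 1 := by
          obtain ⟨h1, h2, h3⟩ := hw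
          exact ⟨by omega, by omega, by omega, by omega⟩
        rw [if_neg hjn, if_pos hbw, if_pos rfl]
        exact StInv_reset (a + 1)
      · rw [if_neg hw]
        have hbw : ¬ (n > 1 ∧ m1 + m2 > 4 ∧ m1 > 1 ∧ m2 > 1) := by
          intro hx
          apply hw
          obtain ⟨-, h2, h3, h4⟩ := hx
          exact ⟨by omega, by omega, by omega⟩
        rw [if_neg hjn, if_neg hbw, if_neg Bool.false_ne_true]
        exact ⟨rfl, hI, hJ, hND, hPos, hN, hM⟩

theorem step_inv (sA : Int × PySem.Dict Int Int)
    (sB : Int × PySem.Dict Int Int × Int × Int × Int × Int)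
    (hInv : StInv sA sB) (i : Int) :
    StInv (solutionStep sA i) (solutionAltStep sB i) := by
  obtain ⟨a, h⟩ := sA
  obtain ⟨a', d, j, n, m1, m2⟩ := sB
  obtain ⟨hA, hI, hJ, hND, hPos, hN, hM⟩ := hInv
  dsimp only at hA hI hJ hND hPos hN hM
  subst hA
  rw [stepA_eq, stepB_eq]
  have hdnd := dict_sub_nodup h d hI hND
  have hdpos : ∀ v ∈ d.values, 1 ≤ v := fun v hv => hPos v (dict_values_sub h d hI v hv)
  by_cases hi : i = 0
  · subst hi
    have hA0 : (if h.contains 0 then h.insert 0 (h.getD 0 0 + 1) else h.insert 0 1)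
        = h.insert 0 (h.getD 0 0 + 1) := by
      by_cases hc : h.contains 0 = true
      · rw [if_pos hc]
      · rw [if_neg (by simp [hc]), PySem.Dict.getD_of_not_contains _ _
          (by cases hcb : h.contains 0; rfl; exact absurd hcb hc)]
        norm_num
    rw [hA0, if_pos rfl]
    dsimp only
    apply check_inv
    · by_cases hc : h.contains 0 = true
      · rw [PySem.Dict.items_insert_of_contains _ _ hc, filter_upd0, hI]
      · rw [PySem.Dict.items_insert_of_not_contains _ _
          (by cases hcb : h.contains 0; rfl; exact absurd hcb hc), hI, List.filter_append]
        simp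
    · rw [PySem.Dict.getD_insert_self, hJ]
    · exact PySem.Dict.nodup_keys_insert _ _ _ hND
    · intro v hv
      rcases PySem.Dict.mem_values_insert _ _ _ _ hv with rfl | hv'
      · have hge : 0 ≤ h.getD 0 0 := by
          by_cases hc : h.contains 0 = true
          · exact le_trans (by norm_num) (getD_pos_of_contains h hPos 0 hc)
          · rw [PySem.Dict.getD_of_not_contains _ _
              (by cases hcb : h.contains 0; rfl; exact absurd hcb hc)]
        omega
      · exact hPos v hv'
    · exact hN
    · exact hM
  · have hget : d.get? i = h.get? i := dict_get?_transfer h d hI hND i hi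
    have hcD : d.getD i 0 = h.getD i 0 := by
      rw [PySem.Dict.getD_eq_get?_getD, PySem.Dict.getD_eq_get?_getD, hget]
    have hcon : d.contains i = h.contains i := by
      rw [PySem.Dict.contains_eq_isSome_get?, PySem.Dict.contains_eq_isSome_get?, hget]
    have hA1 : (if h.contains i then h.insert i (h.getD i 0 + 1) else h.insert i 1)
        = h.insert i (h.getD i 0 + 1) := by
      by_cases hc : h.contains i = true
      · rw [if_pos hc]
      · rw [if_neg (by simp [hc]), PySem.Dict.getD_of_not_contains _ _
          (by cases hcb : h.contains i; rfl; exact absurd hcb hc)]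
        norm_num
    rw [hA1, if_neg hi]
    dsimp only
    rw [hcD]
    have hc0 : 0 ≤ h.getD i 0 := by
      by_cases hcc : h.contains i = true
      · exact le_trans (by norm_num) (getD_pos_of_contains h hPos i hcc)
      · rw [PySem.Dict.getD_of_not_contains _ _
          (by cases hcb : h.contains i; rfl; exact absurd hcb hcc)]
    apply check_inv
    · by_cases hcc : h.contains i = true
      · have hdc : d.contains i = true := by rw [hcon]; exact hcc
        rw [PySem.Dict.items_insert_of_contains _ _ hdc,
          PySem.Dict.items_insert_of_contains _ _ hcc, hI, filter_updi _ _ _ hi]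
      · have hcf : h.contains i = false := by cases hcb : h.contains i; rfl; exact absurd hcb hcc
        have hdf : d.contains i = false := by rw [hcon]; exact hcf
        rw [PySem.Dict.items_insert_of_not_contains _ _ hdf,
          PySem.Dict.items_insert_of_not_contains _ _ hcf, hI, List.filter_append]
        simp [hi]
    · rw [PySem.Dict.getD_insert_of_ne _ _ _ (Ne.symm hi)]
      exact hJ
    · exact PySem.Dict.nodup_keys_insert _ _ _ hND
    · intro v hv
      rcases PySem.Dict.mem_values_insert _ _ _ _ hv with rfl | hv'
      · omega
      · exact hPos v hv'
    · rw [PySem.Dict.size_insert]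
      by_cases hdc : d.contains i = true
      · have h1c : 1 ≤ h.getD i 0 := by
          rw [← hcD]
          exact getD_pos_of_contains d hdpos i hdc
        rw [if_neg (by omega), if_pos hdc]
        exact hN
      · have hdf : d.contains i = false := by cases hcb : d.contains i; rfl; exact absurd hcb hdc
        have hz : h.getD i 0 = 0 := by rw [← hcD]; exact PySem.Dict.getD_of_not_contains _ _ hdf
        rw [if_pos hz, if_neg hdc, hN]
        push_cast
        ring
    · -- top-two invariant
      by_cases hdc : d.contains i = true
      · -- existing key: one occurrence of c in the values becomes c+1
        have hsome : (d.get? i).isSome := by rw [← PySem.Dict.contains_eq_isSome_get?]; exact hdc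
        obtain ⟨v, hv⟩ := Option.isSome_iff_exists.mp hsome
        have hvc : h.getD i 0 = v := by
          rw [← hcD, PySem.Dict.getD_eq_get?_getD, hv]
          rfl
        have hmem : (i, h.getD i 0) ∈ d.items := by
          rw [hvc]
          exact PySem.Dict.mem_items_of_get?_eq_some _ hv
        obtain ⟨l1, l2, hdec⟩ := List.append_of_mem hmem
        have hkeys : ((l1 ++ (i, h.getD i 0) :: l2).map (fun p : Int × Int => p.1)).Nodup := by
          have hh := hdnd
          simp only [PySem.Dict.keys] at hh
          rw [hdec] at hh
          exact hh
        rw [List.map_append, List.map_cons] at hkeys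
        have hmid := List.nodup_middle.mp hkeys
        have hni := (List.nodup_cons.mp hmid).1
        have hni1 : i ∉ l1.map (fun p : Int × Int => p.1) :=
          fun hx => hni (List.mem_append.mpr (Or.inl hx))
        have hni2 : i ∉ l2.map (fun p : Int × Int => p.1) :=
          fun hx => hni (List.mem_append.mpr (Or.inr hx))
        have hitems' : (d.insert i (h.getD i 0 + 1)).items = l1 ++ (i, h.getD i 0 + 1) :: l2 := by
          rw [PySem.Dict.items_insert_of_contains _ _ hdc, hdec, List.map_append, List.map_cons,
            map_upd_of_not_mem _ _ _ hni1, map_upd_of_not_mem _ _ _ hni2]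
          simp
        have hvalsd : d.values = l1.map (fun p : Int × Int => p.2) ++
            h.getD i 0 :: l2.map (fun p : Int × Int => p.2) := by
          show d.items.map (fun p => p.2) = _
          rw [hdec]
          simp
        have hvals' : (d.insert i (h.getD i 0 + 1)).values = l1.map (fun p : Int × Int => p.2) ++
            (h.getD i 0 + 1) :: l2.map (fun p : Int × Int => p.2) := by
          show (d.insert i (h.getD i 0 + 1)).items.map (fun p => p.2) = _
          rw [hitems']
          simp
        have hpermv : d.values.Perm (h.getD i 0 ::
            (l1.map (fun p : Int × Int => p.2) ++ l2.map (fun p : Int × Int => p.2))) := by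
          rw [hvalsd]; exact List.perm_middle
        have hpermv' : (d.insert i (h.getD i 0 + 1)).values.Perm ((h.getD i 0 + 1) ::
            (l1.map (fun p : Int × Int => p.2) ++ l2.map (fun p : Int × Int => p.2))) := by
          rw [hvals']; exact List.perm_middle
        have hRnn : ∀ x ∈ l1.map (fun p : Int × Int => p.2) ++ l2.map (fun p : Int × Int => p.2),
            0 ≤ x := by
          intro x hx
          have hxv : x ∈ d.values := by
            rw [hvalsd]
            rcases List.mem_append.mp hx with h1 | h2
            · exact List.mem_append.mpr (Or.inl h1)
            · exact List.mem_append.mpr (Or.inr (List.mem_cons_of_mem _ h2))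
          exact le_trans (by norm_num) (hdpos x hxv)
        obtain ⟨hf1, hf2, _⟩ := top2_facts _ hRnn
        rcases hTR : top2 (l1.map (fun p : Int × Int => p.2) ++
            l2.map (fun p : Int × Int => p.2)) with ⟨A, B⟩
        rw [hTR] at hf1 hf2
        have hMc : (m1, m2) = top2ins (h.getD i 0) (A, B) := by
          rw [hM, top2_perm hpermv, top2_cons, hTR]
        have hupd := top2_update (h.getD i 0) A B hf2
        rw [← hMc] at hupd
        show (if h.getD i 0 = m1 then (h.getD i 0 + 1, m2)
          else (m1, max m2 (h.getD i 0 + 1))) = top2 (d.insert i (h.getD i 0 + 1)).values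
        rw [top2_perm hpermv', top2_cons, hTR, hupd]
      · -- new key: value 1 is appended
        have hdf : d.contains i = false := by cases hcb : d.contains i; rfl; exact absurd hcb hdc
        have hz : h.getD i 0 = 0 := by rw [← hcD]; exact PySem.Dict.getD_of_not_contains _ _ hdf
        have hitems' : (d.insert i (h.getD i 0 + 1)).items = d.items ++ [(i, h.getD i 0 + 1)] :=
          PySem.Dict.items_insert_of_not_contains _ _ hdf
        have hvals' : (d.insert i (h.getD i 0 + 1)).values = d.values ++ [h.getD i 0 + 1] := by
          show (d.insert i (h.getD i 0 + 1)).items.map (fun p => p.2) = d.items.map (fun p => p.2) ++ _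
          rw [hitems']
          simp
        have hpermv' : (d.insert i (h.getD i 0 + 1)).values.Perm
            ((h.getD i 0 + 1) :: d.values) := by
          rw [hvals']; exact List.perm_append_singleton _ _
        obtain ⟨hf1, hf2, _⟩ := top2_facts d.values
          (fun x hx => le_trans (by norm_num) (hdpos x hx))
        rw [← hM] at hf1 hf2
        dsimp only at hf1 hf2
        show (if h.getD i 0 = m1 then (h.getD i 0 + 1, m2)
          else (m1, max m2 (h.getD i 0 + 1))) = top2 (d.insert i (h.getD i 0 + 1)).values
        rw [top2_perm hpermv', top2_cons, ← hM, hz]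
        simpa using (top2_newkey m1 m2 hf1 hf2).symm

theorem foldl_inv (cards : List Int) : ∀ sA sB, StInv sA sB →
    (cards.foldl solutionStep sA).1 = (cards.foldl solutionAltStep sB).1 := by
  induction cards with
  | nil =>
    intro sA sB hInv
    obtain ⟨h1, -⟩ := hInv
    exact h1
  | cons i t ih =>
    intro sA sB hInv
    exact ih _ _ (step_inv sA sB hInv i)

-- ===== VERDICT (by name: the statement is the Claim_ definition above) =====
theorem solution_spec : Claim_equal_solution := by
  intro cards _
  show solution cards = solution_alt cards
  unfold solution solution_alt
  exact foldl_inv cards _ _ (StInv_reset 0)
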